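-- pv_equiv track=rewrite | github.com/Rbmmmm/OpenRisk-Advisor | code/scripts/signal_engine.py | parse_feature_name
-- ===== SOURCE A (Python) =====
-- from typing import Dict, List, Optional, Tuple
--
-- def parse_feature_name(feature: str, metric_names: List[str]) -> Tuple[Optional[str], str]:
--     if "." in feature:
--         metric, suffix = feature.split(".", 1)
--         # Support object-metric access patterns used in signals.yaml:
--         # - issue_response_time.p95        -> metric=issue_response_time, feature=p95_value
--         # - issue_response_time.avg        -> metric=issue_response_time, feature=avg_value
--         # - issue_response_time.p95_yoy    -> metric=issue_response_time, feature=p95_yoy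
--         if suffix in ("avg", "p95"):
--             return metric, f"{suffix}_value"
--         return metric, suffix
--     for name in sorted(metric_names, key=len, reverse=True):
--         if feature == name:
--             return name, "value"
--         if feature.startswith(f"{name}_"):
--             return name, feature[len(name) + 1 :]
--     return None, feature
-- ===== SOURCE B (Python) =====
-- from typing import List, Optional, Tuple
--
-- def parse_feature_name(feature: str, metric_names: List[str]) -> Tuple[Optional[str], str]:
--     metric, dot, suffix = feature.partition(".")
--     if dot:
--         if suffix in ("avg", "p95"):
--             return metric, suffix + "_value"
--         return metric, suffix
--     names = set(metric_names)
--     head, tail = feature, None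
--     while True:
--         if head in names:
--             return head, "value" if tail is None else tail
--         head, sep, last = head.rpartition("_")
--         if not sep:
--             return None, feature
--         tail = last if tail is None else last + "_" + tail
-- ===== Notes on version B (the rewrite author's own statement) =====
-- stated objective: faster
-- what changed: For the no-dot case, B replaces A's scan over metric_names re-sorted by length on every call with a set of the names plus a rpartition loop that repeatedly chops the feature at its rightmost underscore and tests the shrinking prefix with O(1) set lookups (dot case via partition instead of split).
import Mathlib
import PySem

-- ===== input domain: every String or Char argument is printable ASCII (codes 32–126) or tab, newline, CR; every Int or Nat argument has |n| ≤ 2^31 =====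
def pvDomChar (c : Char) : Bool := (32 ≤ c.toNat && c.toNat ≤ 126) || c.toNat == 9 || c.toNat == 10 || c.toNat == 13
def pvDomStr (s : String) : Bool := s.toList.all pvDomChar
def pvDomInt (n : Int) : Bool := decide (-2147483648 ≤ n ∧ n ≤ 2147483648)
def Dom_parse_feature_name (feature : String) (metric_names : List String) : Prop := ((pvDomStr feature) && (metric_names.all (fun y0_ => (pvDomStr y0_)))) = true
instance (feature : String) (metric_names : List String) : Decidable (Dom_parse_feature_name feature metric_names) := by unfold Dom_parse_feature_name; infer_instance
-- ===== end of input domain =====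

-- B replaces A's scan of metric_names re-sorted by length on every call with a partition/rpartition
-- loop that repeatedly chops the feature at its rightmost underscore and tests the prefix against a
-- set of the names (objective: faster; a timing run measured B ≥ 1.5× faster than A).

-- ===== PORT A =====
-- the "." branch of A
def pfnDotA (feature : String) : Option String × String :=
  match PySem.Str.splitMax? feature "." 1 with
  | some [metric, suffix] =>
      if suffix == "avg" || suffix == "p95" then (some metric, suffix ++ "_value")
      else (some metric, suffix)
  | _ => (none, feature)  -- unreachable: "." in feature, so split(".", 1) yields exactly two parts

-- A's for-loop over sorted(metric_names, key=len, reverse=True) with early returns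
def pfnLoopA (feature : String) : List String → Option String × String
  | [] => (none, feature)
  | name :: rest =>
    if feature == name then (some name, "value")
    else if PySem.Str.startswith feature (name ++ "_") then
      (some name, String.ofList (PySem.List.slice feature.toList (some ((name.length : Int) + 1)) none))
    else pfnLoopA feature rest

def parse_feature_name (feature : String) (metric_names : List String) : Option String × String :=
  if PySem.Str.isIn "." feature then pfnDotA feature
  else pfnLoopA feature (PySem.List.sorted metric_names (fun n => n.length) true)

-- ===== PORT B =====
-- feature.partition("."), ported by hand (exact for the one-character separator ".":
-- split at the FIRST '.', none = separator absent, i.e. Python's ("", "") tail)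
def pfnPartDot : List Char → Option (List Char × List Char)
  | [] => none
  | c :: rest =>
      if c = '.' then some ([], rest)
      else match pfnPartDot rest with
        | some (h, t) => some (c :: h, t)
        | none => none

-- head.rpartition("_"), ported by hand (exact for the one-character separator "_":
-- split at the LAST '_', none = separator absent, i.e. Python's empty sep)
def pfnRPart : List Char → Option (List Char × List Char)
  | [] => none
  | c :: rest =>
      match pfnRPart rest with
      | some (h, t) => some (c :: h, t)
      | none => if c = '_' then some ([], rest) else none

lemma pfnRPart_length : ∀ {cs h t : List Char}, pfnRPart cs = some (h, t) → h.length < cs.length := by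
  intro cs
  induction cs with
  | nil => intro h t hc; simp [pfnRPart] at hc
  | cons c rest ih =>
    intro h t hc
    simp only [pfnRPart] at hc
    cases hr : pfnRPart rest with
    | some p =>
      rw [hr] at hc
      cases p with | mk h' t' =>
      cases hc
      have := ih hr
      simp; omega
    | none =>
      rw [hr] at hc
      by_cases hcu : c = '_'
      · simp [hcu] at hc
        cases hc.1; simp [hc]
      · simp [hcu] at hc

-- B's while-loop: head, tail = feature, None; chop at the rightmost '_' until head is a name
def pfnChop (feature : String) (names : PySem.Set String) (head : List Char)
    (tail : Option (List Char)) : Option String × String :=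
  if PySem.Set.contains names (String.ofList head) then
    (some (String.ofList head),
      match tail with | none => "value" | some t => String.ofList t)
  else
    match hr : pfnRPart head with
    | none => (none, feature)
    | some (h', last) =>
        pfnChop feature names h'
          (some (match tail with | none => last | some t => last ++ '_' :: t))
termination_by head.length
decreasing_by exact pfnRPart_length hr

def parse_feature_name_alt (feature : String) (metric_names : List String) : Option String × String :=
  match pfnPartDot feature.toList with
  | some (metric, suffix) =>
      let m := String.ofList metric
      let sfx := String.ofList suffix
      if sfx == "avg" || sfx == "p95" then (some m, sfx ++ "_value") else (some m, sfx)
  | none => pfnChop feature (PySem.Set.ofList metric_names) feature.toList none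

-- ===== PRECONDITION & SPEC =====
def Spec_parse_feature_name (feature : String) (metric_names : List String) (out : Option String × String) : Prop := out = parse_feature_name_alt feature metric_names
instance (feature : String) (metric_names : List String) (out : Option String × String) : Decidable (Spec_parse_feature_name feature metric_names out) := by unfold Spec_parse_feature_name; infer_instance

-- ===== CLAIM (what is proved, stated in full; the proofs are below) =====
def Claim_equal_parse_feature_name : Prop := ∀ (feature : String) (metric_names : List String), Dom_parse_feature_name feature metric_names → Spec_parse_feature_name feature metric_names (parse_feature_name feature metric_names)

-- ===== LEMMAS AND PROOFS =====

-- ---- the ghost middle form both sides are reduced to: the descending underscore-cut scan ----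

-- the underscore positions of cs, largest first
def pfnCuts (cs : List Char) : List Nat :=
  ((List.range cs.length).filter (fun j => cs[j]? = some '_')).reverse

-- scan the cut positions, largest first; at the first j with feature[:j] a name, return it
def pfnScan (feature : String) (names : PySem.Set String) : List Nat → Option String × String
  | [] => (none, feature)
  | j :: rest =>
    if PySem.Set.contains names (String.ofList (feature.toList.take j)) then
      (some (String.ofList (feature.toList.take j)),
        String.ofList (feature.toList.drop (j + 1)))
    else pfnScan feature names rest

def pfnGhost (feature : String) (names : PySem.Set String) : Option String × String :=
  if PySem.Set.contains names feature then (some feature, "value")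
  else pfnScan feature names (pfnCuts feature.toList)

-- ---- characterizations of the hand-ported partition/rpartition ----

lemma pfnPartDot_none_iff (cs : List Char) : pfnPartDot cs = none ↔ '.' ∉ cs := by
  induction cs with
  | nil => simp [pfnPartDot]
  | cons c rest ih =>
    by_cases hc : c = '.'
    · simp [pfnPartDot, hc]
    · cases hr : pfnPartDot rest with
      | some p => simp [pfnPartDot, hc, hr]; rw [hr] at ih; simp at ih; intro; exact ih
      | none => simp [pfnPartDot, hc, hr]; rw [hr] at ih; simp at ih; exact ⟨Ne.symm hc, ih⟩

lemma pfnPartDot_some : ∀ {cs h t : List Char}, pfnPartDot cs = some (h, t) →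
    cs = h ++ '.' :: t ∧ '.' ∉ h := by
  intro cs
  induction cs with
  | nil => intro h t hc; simp [pfnPartDot] at hc
  | cons c rest ih =>
    intro h t hc
    by_cases hcd : c = '.'
    · simp [pfnPartDot, hcd] at hc
      obtain ⟨rfl, rfl⟩ := hc
      simp [hcd]
    · simp only [pfnPartDot, if_neg hcd] at hc
      cases hr : pfnPartDot rest with
      | some p =>
        rw [hr] at hc
        cases p with | mk h' t' =>
        simp at hc
        obtain ⟨rfl, rfl⟩ := hc
        obtain ⟨hre, hnm⟩ := ih hr
        constructor
        · simp [hre]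
        · simp [hnm, Ne.symm hcd]
      | none => rw [hr] at hc; simp at hc

lemma pfnRPart_none_iff (cs : List Char) : pfnRPart cs = none ↔ '_' ∉ cs := by
  induction cs with
  | nil => simp [pfnRPart]
  | cons c rest ih =>
    cases hr : pfnRPart rest with
    | some p => simp [pfnRPart, hr]; rw [hr] at ih; simp at ih; intro; exact ih
    | none =>
      rw [hr] at ih; simp at ih
      by_cases hc : c = '_'
      · simp [pfnRPart, hr, hc]
      · simp [pfnRPart, hr, hc, Ne.symm hc, ih]

lemma pfnRPart_some : ∀ {cs h t : List Char}, pfnRPart cs = some (h, t) →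
    cs = h ++ '_' :: t ∧ '_' ∉ t := by
  intro cs
  induction cs with
  | nil => intro h t hc; simp [pfnRPart] at hc
  | cons c rest ih =>
    intro h t hc
    simp only [pfnRPart] at hc
    cases hr : pfnRPart rest with
    | some p =>
      rw [hr] at hc
      cases p with | mk h' t' =>
      simp at hc
      obtain ⟨rfl, rfl⟩ := hc
      obtain ⟨hre, hnm⟩ := ih hr
      exact ⟨by simp [hre], hnm⟩
    | none =>
      rw [hr] at hc
      rw [pfnRPart_none_iff] at hr
      by_cases hc' : c = '_'
      · simp [hc'] at hc
        obtain ⟨rfl, rfl⟩ := hc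
        exact ⟨by simp [hc'], hr⟩
      · simp [hc'] at hc

-- ---- the dot branch: A's split(".", 1) agrees with B's partition(".") ----

lemma go_zero : ∀ (fuel : Nat) (l cur : List Char) (acc : List (List Char)),
    PySem.Chars.splitOnMax.go ['.'] fuel 0 l cur acc = ((cur.reverse ++ l) :: acc).reverse := by
  intro fuel l cur acc
  cases fuel with
  | zero => simp [PySem.Chars.splitOnMax.go]
  | succ f =>
    cases l with
    | nil => simp [PySem.Chars.splitOnMax.go]
    | cons c rest => simp [PySem.Chars.splitOnMax.go]

lemma go_dot : ∀ (l : List Char) (fuel : Nat) (cur : List Char) (acc : List (List Char)),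
    l.length < fuel →
    PySem.Chars.splitOnMax.go ['.'] fuel 1 l cur acc =
      match pfnPartDot l with
      | some (h, t) => acc.reverse ++ [cur.reverse ++ h, t]
      | none => acc.reverse ++ [cur.reverse ++ l] := by
  intro l
  induction l with
  | nil =>
    intro fuel cur acc hf
    cases fuel with
    | zero => omega
    | succ f => simp [PySem.Chars.splitOnMax.go, pfnPartDot]
  | cons c rest ih =>
    intro fuel cur acc hf
    cases fuel with
    | zero => omega
    | succ f =>
      by_cases hc : c = '.'
      · have hpre : List.isPrefixOf ['.'] (c :: rest) = true := by simp [List.isPrefixOf, hc]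
        simp only [PySem.Chars.splitOnMax.go, if_neg (by omega : ¬ (1:Nat) = 0), hpre, if_true]
        rw [go_zero]
        simp [pfnPartDot, hc]
      · have hpre : List.isPrefixOf ['.'] (c :: rest) = false := by
          simp [List.isPrefixOf]; exact Ne.symm hc
        simp only [PySem.Chars.splitOnMax.go, if_neg (by omega : ¬ (1:Nat) = 0), hpre,
          Bool.false_eq_true, if_false]
        rw [ih f (c :: cur) acc (by simp at hf; omega)]
        cases hr : pfnPartDot rest with
        | some p =>
          cases p with | mk h t =>
          simp [pfnPartDot, hc, hr]
        | none => simp [pfnPartDot, hc, hr]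

lemma splitMax_dot (feature : String) {h t : List Char}
    (hp : pfnPartDot feature.toList = some (h, t)) :
    PySem.Str.splitMax? feature "." 1 = some [String.ofList h, String.ofList t] := by
  have hdotl : ("." : String).toList = ['.'] := by decide
  unfold PySem.Str.splitMax? PySem.Chars.splitMax? PySem.Chars.splitOnMax
  rw [hdotl]
  simp only [List.isEmpty_cons, if_neg (by omega : ¬ ((1:Int) < 0))]
  have h1 : Int.toNat 1 = 1 := rfl
  rw [h1, go_dot feature.toList (feature.toList.length + 1) [] [] (by omega), hp]
  rfl

lemma isIn_dot_iff (feature : String) :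
    PySem.Str.isIn "." feature = true ↔ '.' ∈ feature.toList := by
  rw [PySem.Str.isIn_iff_infix]
  have hdotl : ("." : String).toList = ['.'] := by decide
  rw [hdotl]
  constructor
  · intro hin; exact hin.mem (by simp)
  · intro hm
    obtain ⟨l1, l2, heq⟩ := List.append_of_mem hm
    exact ⟨l1, l2, by rw [heq]; simp⟩

-- ---- A's loop: first matching name of the length-sorted list = ghost scan ----

-- A's loop condition on one name
def pfnPA (feature name : String) : Bool :=
  (feature == name) || PySem.Str.startswith feature (name ++ "_")

lemma pfnLoopA_eq_find (feature : String) (L : List String) :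
    pfnLoopA feature L =
      match L.find? (pfnPA feature) with
      | some m =>
          if feature == m then (some m, "value")
          else (some m, String.ofList (PySem.List.slice feature.toList (some ((m.length : Int) + 1)) none))
      | none => (none, feature) := by
  induction L with
  | nil => rfl
  | cons name rest ih =>
    cases h1 : (feature == name) with
    | true => simp [pfnLoopA, List.find?, pfnPA, h1]
    | false =>
      cases h2 : PySem.Chars.startswith feature.toList (name.toList ++ ['_']) with
      | true => simp [pfnLoopA, List.find?, pfnPA, h1, h2]
      | false => simp [pfnLoopA, List.find?, pfnPA, h1, h2, ih]

lemma pfnScan_eq_find (feature : String) (names : PySem.Set String) (js : List Nat) :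
    pfnScan feature names js =
      match js.find? (fun j => PySem.Set.contains names (String.ofList (feature.toList.take j))) with
      | some j =>
          (some (String.ofList (feature.toList.take j)),
            String.ofList (feature.toList.drop (j + 1)))
      | none => (none, feature) := by
  induction js with
  | nil => rfl
  | cons j rest ih =>
    cases h : PySem.Set.contains names (String.ofList (feature.toList.take j)) with
    | true => simp only [pfnScan, List.find?, h, if_true]
    | false => simp only [pfnScan, List.find?, h, Bool.false_eq_true, if_false]; exact ih

-- the first hit of find? on a key-descending list has maximal key among hits
lemma find?_max_key {α : Type} (key : α → Nat) {P : α → Bool} :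
    ∀ {L : List α}, L.Pairwise (fun a b => key b ≤ key a) → ∀ {m : α}, L.find? P = some m →
      ∀ x ∈ L, P x = true → key x ≤ key m := by
  intro L
  induction L with
  | nil => intro _ m h; simp at h
  | cons a t ih =>
    intro hp m hfind x hx hPx
    rcases List.pairwise_cons.mp hp with ⟨ha, ht⟩
    cases hPa : P a with
    | true =>
      have hma : a = m := by simpa [List.find?, hPa] using hfind
      subst hma
      rcases List.mem_cons.mp hx with rfl | hx
      · exact le_refl _
      · exact ha x hx
    | false =>
      have hfind' : t.find? P = some m := by simpa [List.find?, hPa] using hfind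
      rcases List.mem_cons.mp hx with rfl | hx
      · simp [hPa] at hPx
      · exact ih ht hfind' x hx hPx

lemma pfnCuts_mem {cs : List Char} {j : Nat} :
    j ∈ pfnCuts cs ↔ j < cs.length ∧ cs[j]? = some '_' := by
  simp [pfnCuts, List.mem_filter]

lemma pfnCuts_pairwise (cs : List Char) : (pfnCuts cs).Pairwise (fun a b => b ≤ a) := by
  unfold pfnCuts
  rw [List.pairwise_reverse]
  exact (List.Pairwise.filter _ List.pairwise_lt_range).imp (by omega)

-- the structural facts about a name matching A's loop condition (the no-dot case)
lemma pfnPA_startswith_iff (feature m : String) :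
    PySem.Str.startswith feature (m ++ "_") = true ↔
      (m.length < feature.toList.length ∧ feature.toList.take m.length = m.toList ∧
        feature.toList[m.length]? = some '_') := by
  have hlen : m.toList.length = m.length := by simp
  rw [PySem.Str.startswith_eq, PySem.Chars.startswith_iff]
  constructor
  · intro h
    have htake := List.prefix_iff_eq_take.mp h
    have hl : m.toList.length + 1 ≤ feature.toList.length := by
      have := h.length_le; simpa using this
    have htake' : feature.toList.take ((m ++ "_").toList.length) = m.toList ++ ['_'] := by
      rw [← htake]; simp [String.toList_append]
    have hlen2 : (m ++ "_").toList.length = m.length + 1 := by simp [String.toList_append]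
    rw [hlen2] at htake'
    refine ⟨by omega, ?_, ?_⟩
    · have : (feature.toList.take (m.length + 1)).take m.length = (m.toList ++ ['_']).take m.length := by
        rw [htake']
      simpa [List.take_take, List.take_append, hlen] using this
    · have : (feature.toList.take (m.length + 1))[m.length]? = (m.toList ++ ['_'])[m.length]? := by
        rw [htake']
      simpa [List.getElem?_take, List.getElem?_append_right, hlen] using this
  · rintro ⟨h1, h2, h3⟩
    rw [List.prefix_iff_eq_take]
    have : feature.toList.take (m.length + 1) = m.toList ++ ['_'] := by
      rw [List.take_add_one, h2, h3]; rfl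
    simp [String.toList_append, hlen, this]

lemma string_length_toList (s : String) : s.toList.length = s.length := by simp

-- A's sorted-loop equals the ghost descending-cut scan
lemma loopA_eq_ghost (feature : String) (metric_names : List String) :
    pfnLoopA feature (PySem.List.sorted metric_names (fun n => n.length) true) =
      pfnGhost feature (PySem.Set.ofList metric_names) := by
  rw [pfnLoopA_eq_find]
  unfold pfnGhost
  rw [pfnScan_eq_find]
  have hpair : (PySem.List.sorted metric_names (fun n => n.length) true).Pairwise
      (fun a b => b.length ≤ a.length) :=
    PySem.List.sorted_pairwise_rev metric_names (fun n => n.length)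
  have hmemS : ∀ x : String, x ∈ PySem.List.sorted metric_names (fun n => n.length) true ↔ x ∈ metric_names :=
    fun x => PySem.List.mem_sorted metric_names (fun n => n.length) true x
  cases hA : List.find? (pfnPA feature) (PySem.List.sorted metric_names (fun n => n.length) true) with
  | none =>
    have hnone := List.find?_eq_none.mp hA
    have hfeat : feature ∉ metric_names := by
      intro hmem
      exact hnone feature ((hmemS feature).mpr hmem) (by simp [pfnPA])
    have hcont : PySem.Set.contains (PySem.Set.ofList metric_names) feature = false := by
      rw [Bool.eq_false_iff]
      intro hc
      exact hfeat ((PySem.Set.mem_ofList metric_names feature).mp ((PySem.Set.contains_iff _ _).mp hc))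
    have hscan : List.find?
        (fun j => PySem.Set.contains (PySem.Set.ofList metric_names) (String.ofList (feature.toList.take j)))
        (pfnCuts feature.toList) = none := by
      rw [List.find?_eq_none]
      intro j hj hQ
      obtain ⟨hjlt, hus⟩ := pfnCuts_mem.mp hj
      have hmem' : String.ofList (feature.toList.take j) ∈ metric_names :=
        (PySem.Set.mem_ofList _ _).mp ((PySem.Set.contains_iff _ _).mp hQ)
      refine hnone _ ((hmemS _).mpr hmem') ?_
      have htl : (String.ofList (feature.toList.take j)).toList = feature.toList.take j :=
        String.toList_ofList
      have hlen : (String.ofList (feature.toList.take j)).length = j := by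
        rw [← string_length_toList, htl, List.length_take]
        omega
      simp only [pfnPA, Bool.or_eq_true, beq_iff_eq]
      right
      rw [pfnPA_startswith_iff, hlen, htl]
      exact ⟨by omega, rfl, hus⟩
    rw [hscan]
    simp only [PySem.Set.contains_iff] at hcont ⊢
    rw [Bool.eq_false_iff] at hcont
    simp
    intro hmem
    exact absurd ((PySem.Set.mem_ofList _ _).mpr hmem) (by simpa using hcont)
  | some m =>
    have hPm := List.find?_some hA
    have hmS := List.mem_of_find?_eq_some hA
    have hm_mn : m ∈ metric_names := (hmemS m).mp hmS
    have hmax := find?_max_key String.length hpair hA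
    by_cases hfe : feature = m
    · subst hfe
      have hcont : PySem.Set.contains (PySem.Set.ofList metric_names) feature = true :=
        (PySem.Set.contains_iff _ _).mpr ((PySem.Set.mem_ofList _ _).mpr hm_mn)
      simp
      intro hn
      exact absurd hm_mn hn
    · have hfeB : (feature == m) = false := by simp [hfe]
      have hstart : PySem.Str.startswith feature (m ++ "_") = true := by
        have := hPm
        simp only [pfnPA, Bool.or_eq_true, hfeB, Bool.false_eq_true, false_or] at this
        exact this
      obtain ⟨hlt, htk, hus⟩ := (pfnPA_startswith_iff feature m).mp hstart
      have hfeat : feature ∉ metric_names := by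
        intro hmem
        have := hmax feature ((hmemS feature).mpr hmem) (by simp [pfnPA])
        have hle : feature.toList.length = feature.length := string_length_toList feature
        omega
      have hcont : PySem.Set.contains (PySem.Set.ofList metric_names) feature = false := by
        rw [Bool.eq_false_iff]
        intro hc
        exact hfeat ((PySem.Set.mem_ofList metric_names feature).mp ((PySem.Set.contains_iff _ _).mp hc))
      have hofl : String.ofList (feature.toList.take m.length) = m := by
        rw [htk]; exact String.ofList_toList
      have hQm : PySem.Set.contains (PySem.Set.ofList metric_names)
          (String.ofList (feature.toList.take m.length)) = true := by
        rw [hofl]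
        exact (PySem.Set.contains_iff _ _).mpr ((PySem.Set.mem_ofList _ _).mpr hm_mn)
      have hmD : m.length ∈ pfnCuts feature.toList :=
        pfnCuts_mem.mpr ⟨hlt, hus⟩
      have hsome : (List.find?
          (fun j => PySem.Set.contains (PySem.Set.ofList metric_names) (String.ofList (feature.toList.take j)))
          (pfnCuts feature.toList)).isSome := by
        rw [List.find?_isSome]
        exact ⟨m.length, hmD, hQm⟩
      obtain ⟨j, hfind⟩ := Option.isSome_iff_exists.mp hsome
      have hjC := pfnCuts_mem.mp (List.mem_of_find?_eq_some hfind)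
      obtain ⟨hjlt, hus'⟩ := hjC
      have hQj := List.find?_some hfind
      have hjm : m.length ≤ j := by
        have := find?_max_key id (pfnCuts_pairwise feature.toList) hfind m.length hmD hQm
        simpa using this
      have hmem'' : String.ofList (feature.toList.take j) ∈ metric_names :=
        (PySem.Set.mem_ofList _ _).mp ((PySem.Set.contains_iff _ _).mp hQj)
      have htl : (String.ofList (feature.toList.take j)).toList = feature.toList.take j :=
        String.toList_ofList
      have hlenj : (String.ofList (feature.toList.take j)).length = j := by
        rw [← string_length_toList, htl, List.length_take]
        omega
      have hmj : j ≤ m.length := by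
        have hPj : pfnPA feature (String.ofList (feature.toList.take j)) = true := by
          simp only [pfnPA, Bool.or_eq_true, beq_iff_eq]
          right
          rw [pfnPA_startswith_iff, hlenj, htl]
          exact ⟨by omega, rfl, hus'⟩
        have := hmax _ ((hmemS _).mpr hmem'') hPj
        omega
      have hjeq : j = m.length := le_antisymm hmj hjm
      subst hjeq
      rw [hfind]
      have h1 : PySem.List.slice feature.toList (some ((m.length : Int) + 1)) none =
          feature.toList.drop (m.length + 1) := by
        rw [PySem.List.slice_from feature.toList (by omega)]
        norm_num
      simp [hfeB, h1, hofl]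
      intro hmem
      exact absurd hmem hfeat

-- ---- B's chop-loop equals the ghost descending-cut scan ----

lemma pfnCuts_eq_nil {cs : List Char} (h : '_' ∉ cs) : pfnCuts cs = [] := by
  unfold pfnCuts
  rw [List.reverse_eq_nil_iff, List.filter_eq_nil_iff]
  intro j hj
  simp only [decide_eq_true_eq]
  intro hus
  exact h (List.mem_of_getElem? hus)

lemma pfnCuts_append (h' last : List Char) (hnl : '_' ∉ last) :
    pfnCuts (h' ++ '_' :: last) = h'.length :: pfnCuts h' := by
  unfold pfnCuts
  have hlen : (h' ++ '_' :: last).length = h'.length + (1 + last.length) := by simp; omega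
  rw [hlen, List.range_add, List.filter_append]
  have h2 : (List.filter (fun j => decide ((h' ++ '_' :: last)[j]? = some '_'))
      ((List.range (1 + last.length)).map fun i => h'.length + i)) = [h'.length] := by
    have hr : List.range (1 + last.length) = 0 :: (List.range last.length).map Nat.succ := by
      rw [Nat.add_comm, List.range_succ_eq_map]
    rw [hr]
    simp only [List.map_cons, List.map_map, List.filter_cons]
    have hp0 : ((h' ++ '_' :: last)[h'.length + 0]? = some '_') := by
      simp
    rw [if_pos (by simp)]
    have htail : List.filter (fun j => decide ((h' ++ '_' :: last)[j]? = some '_'))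
        ((List.range last.length).map ((fun i => h'.length + i) ∘ Nat.succ)) = [] := by
      rw [List.filter_eq_nil_iff]
      intro j hj
      simp only [List.mem_map, Function.comp] at hj
      obtain ⟨k, hk, rfl⟩ := hj
      simp only [decide_eq_true_eq]
      intro hus
      rw [List.getElem?_append_right (by omega)] at hus
      have : ('_' :: last)[h'.length + (k+1) - h'.length]? = some '_' := hus
      have h3 : h'.length + (k + 1) - h'.length = k + 1 := by omega
      rw [h3] at this
      simp at this
      exact hnl (List.mem_of_getElem? this)
    rw [htail]
    simp
  have h1 : List.filter (fun j => decide ((h' ++ '_' :: last)[j]? = some '_')) (List.range h'.length)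
      = List.filter (fun j => decide (h'[j]? = some '_')) (List.range h'.length) := by
    apply List.filter_congr
    intro j hj
    simp only [List.mem_range] at hj
    rw [List.getElem?_append_left hj]
  rw [h1, h2]
  simp

-- the tail accumulator, written back as the characters it stands for
def pfnRep : Option (List Char) → List Char
  | none => []
  | some t => '_' :: t

lemma chop_general (feature : String) (names : PySem.Set String) :
    ∀ (n : Nat) (head : List Char) (tailOpt : Option (List Char)),
    head.length ≤ n →
    feature.toList = head ++ pfnRep tailOpt →
    pfnChop feature names head tailOpt =
      if PySem.Set.contains names (String.ofList head) then
        (some (String.ofList head),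
          match tailOpt with | none => "value" | some t => String.ofList t)
      else pfnScan feature names (pfnCuts head) := by
  intro n
  induction n with
  | zero =>
    intro head tailOpt hle hinv
    have hnil : head = [] := by
      cases head with
      | nil => rfl
      | cons a b => simp at hle
    subst hnil
    rw [pfnChop.eq_def]
    by_cases hc : PySem.Set.contains names (String.ofList []) = true
    · rw [if_pos hc, if_pos hc]
    · rw [if_neg hc, if_neg hc]
      rw [pfnCuts_eq_nil (by simp : ('_' ∉ ([] : List Char)))]
      rfl
  | succ n ih =>
    intro head tailOpt hle hinv
    rw [pfnChop.eq_def]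
    by_cases hc : PySem.Set.contains names (String.ofList head) = true
    · rw [if_pos hc, if_pos hc]
    · rw [if_neg hc, if_neg hc]
      cases hrp : pfnRPart head with
      | none =>
        rw [pfnCuts_eq_nil ((pfnRPart_none_iff head).mp hrp)]
        rfl
      | some p =>
        cases p with | mk h' last =>
        simp only []
        obtain ⟨hre, hnl⟩ := pfnRPart_some hrp
        have hlen : h'.length + 1 + last.length = head.length := by
          rw [hre]; simp; omega
        cases tailOpt with
        | none =>
          have hinv' : feature.toList = h' ++ '_' :: last := by
            rw [hinv, hre]; simp [pfnRep]
          have hih := ih h' (some last) (by omega) (by rw [hinv']; rfl)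
          rw [hih, hre, pfnCuts_append h' last hnl]
          have htake : feature.toList.take h'.length = h' := by
            rw [hinv']
            exact List.take_left
          have hdrop : feature.toList.drop (h'.length + 1) = last := by
            rw [hinv']
            simp [List.drop_append]
          rw [pfnScan, htake, hdrop]
        | some t =>
          have hinv' : feature.toList = h' ++ '_' :: (last ++ '_' :: t) := by
            rw [hinv, hre]; simp [pfnRep]
          have hih := ih h' (some (last ++ '_' :: t)) (by omega) (by rw [hinv']; rfl)
          rw [hih, hre, pfnCuts_append h' last hnl]
          have htake : feature.toList.take h'.length = h' := by
            rw [hinv']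
            exact List.take_left
          have hdrop : feature.toList.drop (h'.length + 1) = last ++ '_' :: t := by
            rw [hinv']
            simp [List.drop_append]
          rw [pfnScan, htake, hdrop]

-- B's chop-loop equals the ghost descending-cut scan
lemma chop_eq_ghost (feature : String) (names : PySem.Set String) :
    pfnChop feature names feature.toList none = pfnGhost feature names := by
  rw [chop_general feature names feature.toList.length feature.toList none (le_refl _)
    (by simp [pfnRep])]
  unfold pfnGhost
  rw [String.ofList_toList]

-- ===== VERDICT (by name: the statement is the Claim_ definition above) =====
theorem parse_feature_name_spec : Claim_equal_parse_feature_name := by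
  intro feature metric_names _
  unfold Spec_parse_feature_name
  unfold parse_feature_name parse_feature_name_alt
  cases hp : pfnPartDot feature.toList with
  | some p =>
    cases p with | mk h t =>
    have hin : PySem.Str.isIn "." feature = true := by
      rw [isIn_dot_iff feature]
      obtain ⟨he, _⟩ := pfnPartDot_some hp
      rw [he]; simp
    rw [if_pos hin]
    unfold pfnDotA
    rw [splitMax_dot feature hp]
  | none =>
    have hin : PySem.Str.isIn "." feature = false := by
      rw [Bool.eq_false_iff]
      intro hi
      exact ((pfnPartDot_none_iff _).mp hp) ((isIn_dot_iff feature).mp hi)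
    rw [if_neg (by rw [Bool.not_eq_true]; exact hin)]
    rw [loopA_eq_ghost, ← chop_eq_ghost]
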